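-- pv_equiv track=rewrite | github.com/piromagnus/RunningManager | graph/hr_zones.py | build_zone_colors
-- ===== SOURCE A (Python) =====
-- DEFAULT_ZONE_COLORS = [
--     "#3b82f6",
--     "#22c55e",
--     "#eab308",
--     "#f97316",
--     "#ef4444",
-- ]
--
-- def build_zone_colors(zone_count: int) -> list[str]:
--     safe_count = max(2, int(zone_count))
--     if safe_count <= len(DEFAULT_ZONE_COLORS):
--         return DEFAULT_ZONE_COLORS[:safe_count]
--     repeated: list[str] = []
--     while len(repeated) < safe_count:
--         repeated.extend(DEFAULT_ZONE_COLORS)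
--     return repeated[:safe_count]
-- ===== SOURCE B (Python) =====
-- DEFAULT_ZONE_COLORS = [
--     "#3b82f6",
--     "#22c55e",
--     "#eab308",
--     "#f97316",
--     "#ef4444",
-- ]
--
-- def build_zone_colors(zone_count: int) -> list[str]:
--     safe_count = max(2, int(zone_count))
--     n = len(DEFAULT_ZONE_COLORS)
--     return [DEFAULT_ZONE_COLORS[i % n] for i in range(safe_count)]
-- ===== Notes on version B (the rewrite author's own statement) =====
-- stated objective: simpler
-- what changed: Replaces A's small-vs-large guard and grow-by-whole-palette-copies-then-slice while-loop with a single uniform comprehension that addresses element i directly as DEFAULT_ZONE_COLORS[i % 5].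
import Mathlib
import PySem

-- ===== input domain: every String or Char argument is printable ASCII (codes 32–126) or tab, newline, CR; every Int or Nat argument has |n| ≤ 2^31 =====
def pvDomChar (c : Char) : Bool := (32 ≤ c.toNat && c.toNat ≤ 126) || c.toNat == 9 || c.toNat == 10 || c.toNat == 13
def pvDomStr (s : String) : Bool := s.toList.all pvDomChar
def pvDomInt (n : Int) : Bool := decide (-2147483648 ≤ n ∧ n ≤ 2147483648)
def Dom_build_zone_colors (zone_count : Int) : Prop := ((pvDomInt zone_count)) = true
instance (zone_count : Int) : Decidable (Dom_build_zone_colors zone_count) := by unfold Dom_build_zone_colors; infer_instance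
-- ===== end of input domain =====

-- B replaces A's guard branch and grow-then-slice while-loop with one uniform pass
-- indexing DEFAULT_ZONE_COLORS[i % 5] directly (objective: simpler).

-- ===== PORT A =====
def DEFAULT_ZONE_COLORS : List String :=
  ["#3b82f6", "#22c55e", "#eab308", "#f97316", "#ef4444"]

-- the 'while len(repeated) < safe_count: repeated.extend(DEFAULT_ZONE_COLORS)' loop
def zcLoop (safe_count : Int) (repeated : List String) : List String :=
  if (repeated.length : Int) < safe_count then
    zcLoop safe_count (repeated ++ DEFAULT_ZONE_COLORS)
  else repeated
termination_by (safe_count - repeated.length).toNat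
decreasing_by simp [DEFAULT_ZONE_COLORS]; omega

def build_zone_colors (zone_count : Int) : List String :=
  let safe_count := max 2 zone_count
  if safe_count ≤ (DEFAULT_ZONE_COLORS.length : Int) then
    PySem.List.slice DEFAULT_ZONE_COLORS none (some safe_count)
  else
    PySem.List.slice (zcLoop safe_count []) none (some safe_count)

-- ===== PORT B =====
def build_zone_colors_alt (zone_count : Int) : List String :=
  let safe_count := max 2 zone_count
  let n : Int := DEFAULT_ZONE_COLORS.length
  (PySem.List.pyRange 0 safe_count 1).map
    (fun i => PySem.List.pyGetD DEFAULT_ZONE_COLORS (PySem.Int.mod i n) "")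

-- ===== PRECONDITION & SPEC =====
def Spec_build_zone_colors (zone_count : Int) (out : List String) : Prop := out = build_zone_colors_alt zone_count
instance (zone_count : Int) (out : List String) : Decidable (Spec_build_zone_colors zone_count out) := by unfold Spec_build_zone_colors; infer_instance

-- ===== CLAIM (what is proved, stated in full; the proofs are below) =====
def Claim_equal_build_zone_colors : Prop := ∀ (zone_count : Int), Dom_build_zone_colors zone_count → Spec_build_zone_colors zone_count (build_zone_colors zone_count)

-- ===== LEMMAS AND PROOFS =====

theorem bzc_A_eq (z : Int) : build_zone_colors z =
    if max 2 z ≤ (DEFAULT_ZONE_COLORS.length : Int) then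
      PySem.List.slice DEFAULT_ZONE_COLORS none (some (max 2 z))
    else
      PySem.List.slice (zcLoop (max 2 z) []) none (some (max 2 z)) := rfl

theorem bzc_B_eq (z : Int) : build_zone_colors_alt z =
    (PySem.List.pyRange 0 (max 2 z) 1).map
      (fun i => PySem.List.pyGetD DEFAULT_ZONE_COLORS (PySem.Int.mod i ((5:Nat):Int)) "") := rfl

-- invariant of the while-loop: result is long enough and cyclic with period 5
theorem zcLoop_prop (safe_count : Int) (repeated : List String)
    (h5 : repeated.length % 5 = 0)
    (hel : ∀ j, j < repeated.length →
      (repeated[j]? : Option String) = DEFAULT_ZONE_COLORS[j % 5]?) :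
    safe_count ≤ ((zcLoop safe_count repeated).length : Int) ∧
    ∀ j, j < (zcLoop safe_count repeated).length →
      ((zcLoop safe_count repeated)[j]? : Option String) = DEFAULT_ZONE_COLORS[j % 5]? := by
  fun_induction zcLoop safe_count repeated with
  | case1 rep hlt ih =>
    apply ih
    · simp [DEFAULT_ZONE_COLORS]; omega
    · intro j hj
      simp only [List.length_append] at hj
      by_cases hcase : j < rep.length
      · rw [List.getElem?_append_left hcase]; exact hel j hcase
      · have hlen5 : DEFAULT_ZONE_COLORS.length = 5 := rfl
        have ht : j - rep.length < 5 := by omega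
        have hmod : j % 5 = (j - rep.length) % 5 := by omega
        rw [List.getElem?_append_right (by omega), hmod, Nat.mod_eq_of_lt ht]
  | case2 rep hlt =>
    exact ⟨by omega, hel⟩

theorem elem_B (zone_count : Int) (i : Nat) (hi : (i : Int) < max 2 zone_count) :
    (build_zone_colors_alt zone_count)[i]? = DEFAULT_ZONE_COLORS[i % 5]? := by
  rw [bzc_B_eq]
  have hn : max 2 zone_count = (((max 2 zone_count).toNat : Nat) : Int) := by omega
  rw [hn, PySem.List.getElem?_map_pyRange_zero _ _ i (by omega)]
  rw [PySem.Int.mod_natCast, PySem.List.pyGetD_natCast]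
  have hlt : i % 5 < DEFAULT_ZONE_COLORS.length := by
    have : DEFAULT_ZONE_COLORS.length = 5 := rfl
    omega
  rw [List.getD_eq_getElem?_getD, List.getElem?_eq_getElem hlt]
  simp

theorem len_B (zone_count : Int) :
    ((build_zone_colors_alt zone_count).length : Int) = max 2 zone_count := by
  rw [bzc_B_eq]
  simp [PySem.List.length_pyRange_one]

-- ===== VERDICT (by name: the statement is the Claim_ definition above) =====
theorem build_zone_colors_spec : Claim_equal_build_zone_colors := by
  intro zone_count _
  unfold Spec_build_zone_colors
  have hsafe2 : (2:Int) ≤ max 2 zone_count := le_max_left _ _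
  have h0 : (0:Int) ≤ max 2 zone_count := by omega
  apply List.ext_getElem?
  intro i
  rw [bzc_A_eq]
  by_cases hi : (i : Int) < max 2 zone_count
  · rw [elem_B zone_count i hi]
    split_ifs with hle
    · rw [PySem.List.slice_to _ h0, List.getElem?_take_of_lt (by omega)]
      have hi5 : i < 5 := by
        have hlen5 : (DEFAULT_ZONE_COLORS.length : Int) = 5 := rfl
        omega
      rw [Nat.mod_eq_of_lt hi5]
    · obtain ⟨hlen, helem⟩ := zcLoop_prop (max 2 zone_count) [] (by simp) (by simp)
      rw [PySem.List.slice_to _ h0, List.getElem?_take_of_lt (by omega)]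
      exact helem i (by omega)
  · have hB : (build_zone_colors_alt zone_count)[i]? = none := by
      apply List.getElem?_eq_none
      have := len_B zone_count
      omega
    rw [hB]
    split_ifs
    all_goals
      rw [PySem.List.slice_to _ h0]
      apply List.getElem?_eq_none
      simp only [List.length_take]
      omega
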